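-- pv_equiv track=rewrite | github.com/YunXiaLiu/Project-Euler | Problem-61.py | genOctagonal
-- ===== SOURCE A (Python) =====
-- def genOctagonal(minnum, maxnum):
--
--     i = 1
--     n = 1
--     while n <= maxnum:
--         if n >= minnum:
--             yield n
--         i += 1
--         n = i * (3*i - 2)
-- ===== SOURCE B (Python) =====
-- def _isqrt(n):
--     # Newton's method integer square root (floor), plain ints.
--     if n < 2:
--         return n
--     x = n
--     y = (x + n // x) // 2
--     while y < x:
--         x = y
--         y = (x + n // x) // 2
--     return x
--
--
-- def _count(x):
--     # number of k >= 1 with k*(3*k-2) <= x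
--     if x < 1:
--         return 0
--     return (1 + _isqrt(1 + 3 * x)) // 3
--
--
-- def genOctagonal(minnum, maxnum):
--     # Invert the octagonal formula with an integer square root to get the exact
--     # index range, then emit each term directly from the closed form.
--     for k in range(_count(minnum - 1) + 1, _count(maxnum) + 1):
--         yield k * (3 * k - 2)
-- ===== Notes on version B (the rewrite author's own statement) =====
-- stated objective: alternative
-- what changed: B replaces A's sequential scan of every octagonal number up to maxnum by algebraically inverting k*(3k-2) with a hand-written Newton integer square root to compute the exact index interval, then emits each in-range term directly from the closed form.
import Mathlib
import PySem

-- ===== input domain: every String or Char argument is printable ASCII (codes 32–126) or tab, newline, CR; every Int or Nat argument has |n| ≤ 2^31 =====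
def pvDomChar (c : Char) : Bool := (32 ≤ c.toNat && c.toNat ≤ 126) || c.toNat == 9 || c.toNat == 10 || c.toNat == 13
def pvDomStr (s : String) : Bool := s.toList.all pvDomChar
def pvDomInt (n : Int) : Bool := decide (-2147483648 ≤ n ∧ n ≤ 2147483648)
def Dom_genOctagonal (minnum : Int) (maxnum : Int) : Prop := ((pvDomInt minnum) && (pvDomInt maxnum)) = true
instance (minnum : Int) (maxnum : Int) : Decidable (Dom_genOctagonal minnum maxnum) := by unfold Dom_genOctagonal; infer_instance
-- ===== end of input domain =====

-- B replaces A's scan of all octagonal numbers up to maxnum by inverting the formula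
-- k*(3k-2) with a Newton integer square root, emitting only the in-range terms directly.

-- ===== PORT A =====
-- A's while-loop over (i, n); yields collected in an accumulator (reversed at the end);
-- fuel bounds the iteration count (n ≥ i at index i, so at most maxnum+1 steps).
def genOctLoopA (minnum maxnum : Int) : Nat → Int → Int → List Int → List Int
  | 0, _, _, acc => acc.reverse
  | fuel + 1, i, n, acc =>
    if n ≤ maxnum then
      genOctLoopA minnum maxnum fuel (i + 1) ((i + 1) * (3 * (i + 1) - 2))
        (if n ≥ minnum then n :: acc else acc)
    else acc.reverse

def genOctagonal (minnum : Int) (maxnum : Int) : List Int :=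
  genOctLoopA minnum maxnum (maxnum.toNat + 1) 1 1 []

-- ===== PORT B =====
-- Source B's _isqrt while-loop (the n ≥ 2 branch): all values are nonnegative there, so
-- Nat arithmetic ((x + n/x)/2, Nat division) is exactly Python's // on those inputs.
def isqrtGo (n x : Nat) : Nat :=
  let y := (x + n / x) / 2
  if y < x then isqrtGo n y else x
termination_by x
decreasing_by omega

-- Source B's _isqrt
def pyIsqrt (n : Int) : Int :=
  if n < 2 then n else (isqrtGo n.toNat n.toNat : Int)

-- Source B's _count
def octCount (x : Int) : Int :=
  if x < 1 then 0 else PySem.Int.floordiv (1 + pyIsqrt (1 + 3 * x)) 3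

-- Source B's generator: one yield per index of the computed range
def genOctagonal_alt (minnum : Int) (maxnum : Int) : List Int :=
  (PySem.List.pyRange (octCount (minnum - 1) + 1) (octCount maxnum + 1) 1).map
    (fun k => k * (3 * k - 2))

-- ===== PRECONDITION & SPEC =====
def Spec_genOctagonal (minnum : Int) (maxnum : Int) (out : List Int) : Prop := out = genOctagonal_alt minnum maxnum
instance (minnum : Int) (maxnum : Int) (out : List Int) : Decidable (Spec_genOctagonal minnum maxnum out) := by unfold Spec_genOctagonal; infer_instance

-- ===== CLAIM (what is proved, stated in full; the proofs are below) =====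
def Claim_equal_genOctagonal : Prop := ∀ (minnum : Int) (maxnum : Int), Dom_genOctagonal minnum maxnum → Spec_genOctagonal minnum maxnum (genOctagonal minnum maxnum)

-- ===== LEMMAS AND PROOFS =====

-- The ported Newton loop is core Lean's Nat.sqrt.iter.
theorem isqrtGo_eq_iter (x : Nat) : ∀ n, isqrtGo n x = Nat.sqrt.iter n x := by
  induction x using Nat.strong_induction_on with
  | _ x ih =>
    intro n
    unfold isqrtGo Nat.sqrt.iter
    by_cases h : (x + n / x) / 2 < x
    · simp only [h, if_pos, dif_pos]
      exact ih _ h n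
    · simp [h]

-- Bracketing property of pyIsqrt on nonnegative input.
theorem pyIsqrt_spec (m : Int) (hm : 0 ≤ m) :
    0 ≤ pyIsqrt m ∧ pyIsqrt m * pyIsqrt m ≤ m ∧ m < (pyIsqrt m + 1) * (pyIsqrt m + 1) := by
  unfold pyIsqrt
  by_cases h : m < 2
  · simp only [h, if_pos]
    interval_cases m <;> norm_num
  · simp only [h, if_neg, not_false_iff]
    rw [isqrtGo_eq_iter]
    have h1 := Nat.sqrt.iter_sq_le m.toNat m.toNat
    have h2 := Nat.sqrt.lt_iter_succ_sq m.toNat m.toNat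
      (by nlinarith [Int.toNat_of_nonneg hm])
    zify at h1 h2
    rw [Int.toNat_of_nonneg hm] at h1 h2
    exact ⟨by positivity, h1, h2⟩

-- Characterization of _count: for k ≥ 1, oct(k) ≤ x ↔ k ≤ octCount x.
theorem octCount_char (x k : Int) (hk : 1 ≤ k) :
    k * (3 * k - 2) ≤ x ↔ k ≤ octCount x := by
  unfold octCount
  by_cases hx : x < 1
  · simp only [hx, if_pos]
    constructor
    · intro h; nlinarith
    · intro h; omega
  · simp only [hx, if_neg, not_false_iff]
    push Not at hx
    obtain ⟨hs0, hs1, hs2⟩ := pyIsqrt_spec (1 + 3 * x) (by omega)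
    set s := pyIsqrt (1 + 3 * x) with hs
    rw [PySem.Int.le_floordiv_iff_mul_le (by norm_num)]
    constructor
    · intro h
      nlinarith
    · intro h
      nlinarith

theorem octCount_nonneg (x : Int) : 0 ≤ octCount x := by
  unfold octCount
  by_cases hx : x < 1
  · simp [hx]
  · simp only [hx, if_neg, not_false_iff]
    obtain ⟨hs0, _, _⟩ := pyIsqrt_spec (1 + 3 * x) (by omega)
    rw [show (0 : Int) = 0 from rfl]
    have := PySem.Int.le_floordiv_iff_mul_le (a := 1 + pyIsqrt (1 + 3 * x)) (q := 0) (show (0:Int) < 3 by norm_num)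
    rw [this]
    omega

-- A's loop, run from index i with enough fuel, produces exactly the octagonal values
-- of the index interval [max i (L+1), H] where L, H characterize the two bounds.
theorem loopA_eq (minnum maxnum L H : Int)
    (charL : ∀ k : Int, 1 ≤ k → (k * (3 * k - 2) ≤ minnum - 1 ↔ k ≤ L))
    (charH : ∀ k : Int, 1 ≤ k → (k * (3 * k - 2) ≤ maxnum ↔ k ≤ H)) :
    ∀ (fuel : Nat) (i : Int) (acc : List Int), 1 ≤ i → (H + 1 - i).toNat ≤ fuel →
      genOctLoopA minnum maxnum fuel i (i * (3 * i - 2)) acc =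
        acc.reverse ++ (PySem.List.pyRange (max i (L + 1)) (H + 1) 1).map
          (fun k => k * (3 * k - 2)) := by
  intro fuel
  induction fuel with
  | zero =>
    intro i acc hi hf
    have : H + 1 ≤ i := by omega
    rw [PySem.List.pyRange_one_eq_nil (by omega)]
    simp [genOctLoopA]
  | succ f ih =>
    intro i acc hi hf
    simp only [genOctLoopA]
    by_cases hle : i * (3 * i - 2) ≤ maxnum
    · have hiH : i ≤ H := (charH i hi).mp hle
      rw [if_pos hle]
      by_cases hge : i * (3 * i - 2) ≥ minnum
      · have hiL : ¬ (i ≤ L) := fun h => by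
          have := (charL i hi).mpr h
          omega
        rw [if_pos hge, ih (i + 1) _ (by omega) (by omega)]
        have hmax1 : max i (L + 1) = i := by omega
        have hmax2 : max (i + 1) (L + 1) = i + 1 := by omega
        rw [hmax1, hmax2, PySem.List.pyRange_one_cons (a := i) (b := H + 1) (by omega)]
        simp
      · have hiL : i ≤ L := by
          have := (charL i hi).mp (by omega)
          omega
        rw [if_neg hge, ih (i + 1) _ (by omega) (by omega)]
        have hmax1 : max i (L + 1) = L + 1 := by omega
        have hmax2 : max (i + 1) (L + 1) = L + 1 := by omega
        rw [hmax1, hmax2]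
    · have hiH : ¬ (i ≤ H) := fun h => hle ((charH i hi).mpr h)
      rw [if_neg hle, PySem.List.pyRange_one_eq_nil (by omega)]
      simp

-- ===== VERDICT (by name: the statement is the Claim_ definition above) =====
theorem genOctagonal_spec : Claim_equal_genOctagonal := by
  intro minnum maxnum _
  unfold Spec_genOctagonal genOctagonal genOctagonal_alt
  have charL : ∀ k : Int, 1 ≤ k → (k * (3 * k - 2) ≤ minnum - 1 ↔ k ≤ octCount (minnum - 1)) :=
    fun k hk => octCount_char (minnum - 1) k hk
  have charH : ∀ k : Int, 1 ≤ k → (k * (3 * k - 2) ≤ maxnum ↔ k ≤ octCount maxnum) :=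
    fun k hk => octCount_char maxnum k hk
  have hL : 0 ≤ octCount (minnum - 1) := octCount_nonneg _
  have hH : 0 ≤ octCount maxnum := octCount_nonneg _
  have hHm : octCount maxnum ≤ max maxnum 0 := by
    by_cases h : octCount maxnum ≤ 0
    · omega
    · have h1 : (1 : Int) ≤ octCount maxnum := by omega
      have h2 := (charH (octCount maxnum) h1).mpr le_rfl
      have h3 : octCount maxnum ≤ octCount maxnum * (3 * octCount maxnum - 2) := by nlinarith
      omega
  have hfuel : (octCount maxnum + 1 - 1).toNat ≤ maxnum.toNat + 1 := by omega
  have := loopA_eq minnum maxnum (octCount (minnum - 1)) (octCount maxnum)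
    charL charH (maxnum.toNat + 1) 1 [] (by norm_num) hfuel
  norm_num at this
  rw [this]
  have hmax : max 1 (octCount (minnum - 1) + 1) = octCount (minnum - 1) + 1 := by omega
  rw [hmax]
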